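-- pv_equiv track=rewrite | github.com/amandesai01/plagiarism-detector | finder.py | find
-- ===== SOURCE A (Python) =====
-- def find(FinalHash):
--     # plagiarism_values=[]
--     # for hash_text in FinalHash:
--     #     match = 0
--     #     for compare in FinalHash:
--     #         temp_list=[]
--     #         for hash_val in hash_text:
--     #             if hash_val in set(compare):
--     #                 match+=1
--
--     #     percentage = match/len(hash_text)
--     #     plagiarism_values.append(percentage)
--
--     # return plagiarism_values
--     plagiarism_values =[]
--     for hash_text_file,hash_text_array in FinalHash:
--         hash_vals = []
--         for compare_text_file,compare_text_array in FinalHash: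
--             match=0
--             for hash_val in hash_text_array:
--                 if hash_val in set(compare_text_array):
--                     match+=1
--             percentage = match//len(compare_text_array)
--             hash_vals.append((compare_text_file,percentage))
--         plagiarism_values.append((hash_text_file,hash_vals))
--     return plagiarism_values
-- ===== SOURCE B (Python) =====
-- def _counter(arr):
--     counts = {}
--     for v in arr:
--         counts[v] = counts.get(v, 0) + 1
--     return counts
--
--
-- def find(FinalHash):
--     # Stage 1: precompute, once per file, its multiplicity table, its distinct
--     # values and its length.
--     counters = [(f, _counter(arr)) for f, arr in FinalHash]
--     uniq = [(f, set(arr), len(arr)) for f, arr in FinalHash]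
--     # Stage 2: build the whole result by comprehension; the match count for a
--     # (outer, inner) pair is the sum over inner's DISTINCT values of outer's
--     # multiplicity of that value.
--     return [
--         (f, [(g, sum(cnt.get(v, 0) for v in u) // L) for g, u, L in uniq])
--         for f, cnt in counters
--     ]
-- ===== Notes on version B (the rewrite author's own statement) =====
-- stated objective: faster
-- what changed: B precomputes in a staged pass one multiplicity table and one distinct-value set per file, then builds the whole result by nested comprehensions where each match is the sum of outer multiplicities over the inner file's distinct values, instead of A's triple loop that rebuilds set(compare_text_array) inside the innermost loop and tests membership per element.
-- outside the precondition, e.g. on find([('a', [])]): A raises ZeroDivisionError, B raises ZeroDivisionError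
import Mathlib
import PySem

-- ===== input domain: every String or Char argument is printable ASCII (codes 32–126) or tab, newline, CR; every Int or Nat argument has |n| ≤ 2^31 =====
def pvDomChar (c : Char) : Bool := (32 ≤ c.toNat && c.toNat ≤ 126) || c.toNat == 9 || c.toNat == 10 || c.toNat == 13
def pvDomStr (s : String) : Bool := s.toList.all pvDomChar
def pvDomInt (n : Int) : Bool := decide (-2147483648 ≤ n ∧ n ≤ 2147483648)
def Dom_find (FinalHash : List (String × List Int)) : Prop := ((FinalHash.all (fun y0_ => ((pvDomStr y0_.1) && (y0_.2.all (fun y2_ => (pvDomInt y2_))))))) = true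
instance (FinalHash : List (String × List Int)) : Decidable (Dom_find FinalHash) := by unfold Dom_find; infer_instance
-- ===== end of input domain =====

-- B change (objective: faster): staged precomputation of per-file multiplicity tables and
-- distinct-value sets, then a comprehension-style build where each match sums outer
-- multiplicities over the inner file's distinct values, replacing A's triple loop that
-- rebuilds set(compare_text_array) inside the innermost loop.

-- ===== PORT A =====
def find (FinalHash : List (String × List Int)) : List (String × (List (String × Int))) :=
  FinalHash.foldl (fun plagiarism_values ht =>
    let hash_vals : List (String × Int) :=
      FinalHash.foldl (fun hash_vals ct =>
        let m : Int := ht.2.foldl (fun m v =>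
          if PySem.Set.contains (PySem.Set.ofList ct.2) v then m + 1 else m) 0
        let percentage : Int := PySem.Int.floordiv m (ct.2.length : Int)
        hash_vals ++ [(ct.1, percentage)]) []
    plagiarism_values ++ [(ht.1, hash_vals)]) []

-- ===== PORT B =====
-- B's helper _counter: a dict mapping each value to its multiplicity.
def counterOf (arr : List Int) : PySem.Dict Int Int :=
  arr.foldl (fun counts v => counts.insert v (counts.getD v 0 + 1)) PySem.Dict.empty

def find_alt (FinalHash : List (String × List Int)) : List (String × (List (String × Int))) :=
  let counters : List (String × PySem.Dict Int Int) :=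
    FinalHash.map (fun p => (p.1, counterOf p.2))
  let uniq : List (String × PySem.Set Int × Int) :=
    FinalHash.map (fun p => (p.1, PySem.Set.ofList p.2, (p.2.length : Int)))
  counters.map (fun fc =>
    (fc.1, uniq.map (fun gu =>
      (gu.1, PySem.Int.floordiv ((gu.2.1.map (fun v => fc.2.getD v 0)).sum) gu.2.2))))

-- ===== PRECONDITION & SPEC =====
-- Pre_ excludes exactly the inputs on which Python A raises ZeroDivisionError:
-- a nonempty FinalHash containing some file whose hash array is empty.
def Pre_find (FinalHash : List (String × List Int)) : Prop :=
  ∀ p ∈ FinalHash, p.2 ≠ []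
instance (FinalHash : List (String × List Int)) : Decidable (Pre_find FinalHash) := by
  unfold Pre_find; infer_instance

def pvWitness_find : (List (String × List Int)) := [("a", [1, 2, 2]), ("b", [2, 3])]

def Spec_find (FinalHash : List (String × List Int)) (out : List (String × (List (String × Int)))) : Prop := out = find_alt FinalHash
instance (FinalHash : List (String × List Int)) (out : List (String × (List (String × Int)))) : Decidable (Spec_find FinalHash out) := by unfold Spec_find; infer_instance

-- ===== CLAIM (what is proved, stated in full; the proofs are below) =====
def Claim_equal_find : Prop := ∀ (FinalHash : List (String × List Int)), Dom_find FinalHash → Pre_find FinalHash → Spec_find FinalHash (find FinalHash)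

-- ===== LEMMAS AND PROOFS =====

-- A foldl that appends one transformed element per step is a map.
theorem foldl_append_one {α β : Type} (f : α → β) (l : List α) (acc : List β) :
    l.foldl (fun a x => a ++ [f x]) acc = acc ++ l.map f := by
  induction l generalizing acc with
  | nil => simp
  | cons a t ih => simp [ih]

-- A's innermost loop counts the elements of h lying in S.
theorem countA_eq (S : List Int) (h : List Int) (m0 : Int) :
    h.foldl (fun m v => if PySem.Set.contains S v then m + 1 else m) m0
      = m0 + (h.countP (fun v => PySem.Set.contains S v) : Int) := by
  induction h generalizing m0 with
  | nil => simp
  | cons a t ih =>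
    rw [List.foldl_cons, List.countP_cons, ih]
    split_ifs <;> push_cast <;> ring

-- Counting membership in b :: r splits, when b ∉ r.
theorem countP_cons_mem (b : Int) (r : List Int) (hbr : b ∉ r) (h : List Int) :
    h.countP (fun v => decide (v ∈ b :: r)) = h.count b + h.countP (fun v => decide (v ∈ r)) := by
  induction h with
  | nil => simp
  | cons a t ih =>
    simp only [List.countP_cons, List.count_cons, ih]
    by_cases hab : a = b
    · subst hab; simp [hbr]; omega
    · by_cases har : a ∈ r <;> simp [hab, har, Ne.symm, List.mem_cons] <;> omega

-- Summing the multiplicity of each element of a nodup list S in h counts h's elements in S.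
theorem sum_count (h : List Int) (S : List Int) (hnd : S.Nodup) :
    (S.map (fun v => (h.count v : Int))).sum = (h.countP (fun v => decide (v ∈ S)) : Int) := by
  induction S with
  | nil => simp
  | cons b r ih =>
    rcases List.nodup_cons.1 hnd with ⟨hbr, hr⟩
    rw [List.map_cons, List.sum_cons, ih hr, countP_cons_mem b r hbr h]
    push_cast; ring

-- A's inner count equals B's sum of multiplicities over the distinct compare values.
theorem inner_eq (h c : List Int) :
    h.foldl (fun m v => if PySem.Set.contains (PySem.Set.ofList c) v then m + 1 else m) 0
      = ((PySem.Set.ofList c).map (fun v => (counterOf h).getD v 0)).sum := by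
  rw [countA_eq]
  unfold counterOf
  simp only [PySem.Dict.foldl_insert_getD_add_one_eq_counter, PySem.Dict.getD_counter]
  rw [sum_count h _ (PySem.Set.nodup_ofList c), Int.zero_add]
  congr 1
  apply List.countP_congr
  intro v _
  by_cases hv : v ∈ PySem.Set.ofList c <;>
    simp [hv, PySem.Set.contains_eq_listContains]

theorem find_eq_alt (FinalHash : List (String × List Int)) :
    find FinalHash = find_alt FinalHash := by
  unfold find find_alt
  rw [foldl_append_one]
  simp only [List.nil_append, List.map_map]
  apply List.map_congr_left
  intro ht _
  dsimp only [Function.comp]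
  rw [foldl_append_one]
  simp only [List.nil_append]
  congr 1
  apply List.map_congr_left
  intro ct _
  dsimp only [Function.comp]
  rw [inner_eq ht.2 ct.2]

-- ===== VERDICT (by name: the statement is the Claim_ definition above) =====
theorem find_spec : Claim_equal_find := by
  intro FinalHash _ _
  exact find_eq_alt FinalHash
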